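-- pv_equiv track=rewrite | github.com/msampaio/flauta-solo | ReducaoContornoMorris.Algoritmo 2.2/ReducaoContornoMorris2.1.py | Etapa7
-- ===== SOURCE A (Python) =====
-- def Etapa7 (lMin,C):
-- 	i = 0
-- 	k = 0
-- 	newList = []
-- 	newList.append(lMin[0])
-- 	while (i < (len(lMin)-2)):
-- 		if ((lMin[i+1] <= lMin[i]) and (lMin[i+1] <= lMin[i+2])):
-- 			if(lMin[i+1] != newList[k]):
-- 				k+=1
-- 				newList.append(lMin[i+1])
-- 			elif ((lMin[i+1] == lMin[0]) or ((lMin[i+1] == lMin[len(lMin)-1]))):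
-- 				n = C.index(lMin[i+1])
-- 				C.pop(n)
-- 			else:
-- 				n = C.index(lMin[i+1])
-- 				C.pop(n)
-- 		i+=1
-- 	newList.append(lMin[len(lMin)-1])
-- 	return newList
-- ===== SOURCE B (Python) =====
-- def Etapa7(lMin, C):
--     # One pass over adjacent triples building newList and per-value removal
--     # counts, then one pass rebuilding C skipping the first k occurrences.
--     newList = [lMin[0]]
--     removed = {}
--     for a, v, b in zip(lMin, lMin[1:], lMin[2:]):
--         if v <= a and v <= b:
--             if v != newList[-1]:
--                 newList.append(v)
--             else:
--                 removed[v] = removed.get(v, 0) + 1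
--     kept = []
--     for x in C:
--         if removed.get(x, 0) > 0:
--             removed[x] -= 1
--         else:
--             kept.append(x)
--     C[:] = kept
--     newList.append(lMin[-1])
--     return newList
-- ===== Notes on version B (the rewrite author's own statement) =====
-- stated objective: faster
-- what changed: B makes one pass over adjacent triples building newList while counting removals per value in a dict, then rebuilds C in a single pass skipping the first k occurrences, instead of A's repeated C.index/C.pop linear scans inside the loop.
-- outside the precondition, e.g. on Etapa7([2, 1, 1, 2], [5]): A raises ValueError, B returns [2, 1, 2]
import Mathlib
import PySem

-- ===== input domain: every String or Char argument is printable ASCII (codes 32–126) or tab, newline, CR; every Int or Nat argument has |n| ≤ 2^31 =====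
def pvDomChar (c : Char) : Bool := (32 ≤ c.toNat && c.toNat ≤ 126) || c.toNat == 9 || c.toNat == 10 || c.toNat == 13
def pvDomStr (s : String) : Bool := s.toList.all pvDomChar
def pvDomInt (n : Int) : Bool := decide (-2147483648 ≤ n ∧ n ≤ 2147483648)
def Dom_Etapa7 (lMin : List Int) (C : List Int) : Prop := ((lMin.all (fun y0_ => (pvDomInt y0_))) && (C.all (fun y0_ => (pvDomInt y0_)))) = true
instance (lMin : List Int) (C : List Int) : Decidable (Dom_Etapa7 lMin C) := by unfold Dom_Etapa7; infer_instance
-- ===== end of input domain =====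

-- B replaces A's quadratic C.index/C.pop scans by a single pass that counts removals
-- per value and one rebuilding pass over C.  NOTE: the Python A mutates C in place;
-- Source B performs the identical mutation, but the equivalence proved here is about the
-- RETURN value (newList), which does not depend on C.

-- ===== PORT A =====
-- Transliteration of A's while loop: state (k, newList, C), i runs over range(0, len(lMin)-2).
-- All lMin/newList indices are in range whenever the loop runs (the default 0 of pyGetD is
-- never the result on inputs admitted by Pre_); a failing C.index (Python ValueError) is
-- excluded by Pre_ and ported as "leave C unchanged".
def Etapa7Body (lMin : List Int) (s : Int × List Int × List Int) (i : Int) :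
    Int × List Int × List Int :=
  let k := s.1; let newList := s.2.1; let c := s.2.2
  if PySem.List.pyGetD lMin (i+1) 0 ≤ PySem.List.pyGetD lMin i 0 ∧
     PySem.List.pyGetD lMin (i+1) 0 ≤ PySem.List.pyGetD lMin (i+2) 0 then
    if PySem.List.pyGetD lMin (i+1) 0 ≠ PySem.List.pyGetD newList k 0 then
      (k + 1, newList ++ [PySem.List.pyGetD lMin (i+1) 0], c)
    else if PySem.List.pyGetD lMin (i+1) 0 = PySem.List.pyGetD lMin 0 0 ∨
            PySem.List.pyGetD lMin (i+1) 0 = PySem.List.pyGetD lMin ((lMin.length : Int) - 1) 0 then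
      match PySem.List.index? c (PySem.List.pyGetD lMin (i+1) 0) with
      | some n => (k, newList, ((PySem.List.pop? c (n : Int)).map Prod.snd).getD c)
      | none => (k, newList, c)
    else
      match PySem.List.index? c (PySem.List.pyGetD lMin (i+1) 0) with
      | some n => (k, newList, ((PySem.List.pop? c (n : Int)).map Prod.snd).getD c)
      | none => (k, newList, c)
  else s

def Etapa7 (lMin : List Int) (C : List Int) : List Int :=
  let newList := [PySem.List.pyGetD lMin 0 0]
  let st := (PySem.List.pyRange 0 ((lMin.length : Int) - 2) 1).foldl (Etapa7Body lMin) (0, newList, C)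
  st.2.1 ++ [PySem.List.pyGetD lMin ((lMin.length : Int) - 1) 0]

-- ===== PORT B =====
-- Transliteration of Source B: one pass over adjacent triples building newList and the
-- per-value removal counter, then one pass rebuilding C (Source B's in-place C[:] = kept;
-- it does not affect the returned value).
def Etapa7AltBody (s : List Int × PySem.Dict Int Int) (t : (Int × Int) × Int) :
    List Int × PySem.Dict Int Int :=
  if t.1.2 ≤ t.1.1 ∧ t.1.2 ≤ t.2 then
    if t.1.2 ≠ PySem.List.pyGetD s.1 (-1) 0 then (s.1 ++ [t.1.2], s.2)
    else (s.1, s.2.insert t.1.2 (s.2.getD t.1.2 0 + 1))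
  else s

def Etapa7_alt (lMin : List Int) (C : List Int) : List Int :=
  let trips := (lMin.zip (lMin.drop 1)).zip (lMin.drop 2)
  let st := trips.foldl Etapa7AltBody ([PySem.List.pyGetD lMin 0 0], PySem.Dict.empty)
  let _kept := C.foldl (fun (s : PySem.Dict Int Int × List Int) x =>
      if s.1.getD x 0 > 0 then (s.1.insert x (s.1.getD x 0 - 1), s.2)
      else (s.1, s.2 ++ [x])) (st.2, ([] : List Int))
  st.1 ++ [PySem.List.pyGetD lMin (-1) 0]

-- ===== PRECONDITION & SPEC =====
-- Helpers for Pre_: the interior local-minimum values of lMin, preceded by lMin[0].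
def pvSeq_Etapa7 (lMin : List Int) : List Int :=
  lMin.headD 0 ::
    (((lMin.zip (lMin.drop 1)).zip (lMin.drop 2)).filter
      (fun t => decide (t.1.2 ≤ t.1.1) && decide (t.1.2 ≤ t.2))).map (fun t => t.1.2)
-- Adjacent duplicates in that sequence: exactly the values A pops from C (A pops each once).
def pvDups_Etapa7 (lMin : List Int) : List Int :=
  (((pvSeq_Etapa7 lMin).zip ((pvSeq_Etapa7 lMin).drop 1)).filter (fun p => p.1 == p.2)).map
    (fun p => p.2)
-- Pre_ excludes exactly the inputs on which the Python A raises: lMin = [] (IndexError on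
-- lMin[0]) and inputs where some C.index call fails (ValueError), i.e. where C holds fewer
-- copies of some value than A pops.
def Pre_Etapa7 (lMin : List Int) (C : List Int) : Prop :=
  lMin ≠ [] ∧ ∀ v ∈ pvDups_Etapa7 lMin, (pvDups_Etapa7 lMin).count v ≤ C.count v
instance (lMin : List Int) (C : List Int) : Decidable (Pre_Etapa7 lMin C) := by
  unfold Pre_Etapa7; infer_instance
def pvWitness_Etapa7 : List Int × List Int := ([3, 1, 2, 1, 3], [1, 1, 2])

def Spec_Etapa7 (lMin : List Int) (C : List Int) (out : List Int) : Prop := out = Etapa7_alt lMin C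
instance (lMin : List Int) (C : List Int) (out : List Int) : Decidable (Spec_Etapa7 lMin C out) := by unfold Spec_Etapa7; infer_instance

-- ===== CLAIM (what is proved, stated in full; the proofs are below) =====
def Claim_equal_Etapa7 : Prop := ∀ (lMin : List Int) (C : List Int), Dom_Etapa7 lMin C → Pre_Etapa7 lMin C → Spec_Etapa7 lMin C (Etapa7 lMin C)

-- ===== LEMMAS AND PROOFS =====

-- A's loop body, rephrased to take the triple (lMin[i], lMin[i+1], lMin[i+2]) directly.
def pvTBody (lMin : List Int) (s : Int × List Int × List Int) (t : (Int × Int) × Int) :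
    Int × List Int × List Int :=
  if t.1.2 ≤ t.1.1 ∧ t.1.2 ≤ t.2 then
    if t.1.2 ≠ PySem.List.pyGetD s.2.1 s.1 0 then
      (s.1 + 1, s.2.1 ++ [t.1.2], s.2.2)
    else if t.1.2 = PySem.List.pyGetD lMin 0 0 ∨
            t.1.2 = PySem.List.pyGetD lMin ((lMin.length : Int) - 1) 0 then
      match PySem.List.index? s.2.2 t.1.2 with
      | some n => (s.1, s.2.1, ((PySem.List.pop? s.2.2 (n : Int)).map Prod.snd).getD s.2.2)
      | none => (s.1, s.2.1, s.2.2)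
    else
      match PySem.List.index? s.2.2 t.1.2 with
      | some n => (s.1, s.2.1, ((PySem.List.pop? s.2.2 (n : Int)).map Prod.snd).getD s.2.2)
      | none => (s.1, s.2.1, s.2.2)
  else s

theorem pvBody_eq (lMin : List Int) (s : Int × List Int × List Int) (i : Int) :
    Etapa7Body lMin s i =
      pvTBody lMin s
        ((PySem.List.pyGetD lMin i 0, PySem.List.pyGetD lMin (i + 1) 0),
          PySem.List.pyGetD lMin (i + 2) 0) := rfl

theorem pvTrips_length (l : List Int) :
    ((l.zip (l.drop 1)).zip (l.drop 2)).length = l.length - 2 := by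
  simp [List.length_zip]; omega

theorem pvTrips_getD (l : List Int) (j : Int) (h0 : 0 ≤ j) (h2 : j < (l.length : Int) - 2) :
    PySem.List.pyGetD ((l.zip (l.drop 1)).zip (l.drop 2)) j ((0, 0), 0) =
      ((PySem.List.pyGetD l j 0, PySem.List.pyGetD l (j + 1) 0),
        PySem.List.pyGetD l (j + 2) 0) := by
  have hl := pvTrips_length l
  rw [PySem.List.pyGetD_eq_getElem _ _ h0 (by rw [hl, Nat.cast_sub (by omega)]; omega),
    PySem.List.pyGetD_eq_getElem _ _ h0 (by omega),
    PySem.List.pyGetD_eq_getElem _ _ (by omega) (by omega),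
    PySem.List.pyGetD_eq_getElem _ _ (by omega) (by omega)]
  simp only [List.getElem_zip, List.getElem_drop]
  have e1 : (j + 1).toNat = 1 + j.toNat := by omega
  have e2 : (j + 2).toNat = 2 + j.toNat := by omega
  simp [e1, e2]

theorem pvRange_bound (l : List Int) (h : 2 ≤ l.length) :
    ((l.length : Int) - 2) = (((l.zip (l.drop 1)).zip (l.drop 2)).length : Int) := by
  rw [pvTrips_length l]; omega

-- converting A's index loop into a fold over the triple list
theorem pvLoopA_eq_trips (lMin : List Int) (init : Int × List Int × List Int) :
    (PySem.List.pyRange 0 ((lMin.length : Int) - 2) 1).foldl (Etapa7Body lMin) init =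
      ((lMin.zip (lMin.drop 1)).zip (lMin.drop 2)).foldl (pvTBody lMin) init := by
  by_cases hn : 2 ≤ lMin.length
  · have hc := PySem.List.foldl_congr_mem
      (PySem.List.pyRange 0 ((lMin.length : Int) - 2)) (Etapa7Body lMin)
      (fun s i => pvTBody lMin s
        (PySem.List.pyGetD ((lMin.zip (lMin.drop 1)).zip (lMin.drop 2)) i ((0, 0), 0)))
      init
      (by
        intro acc x hx
        rw [PySem.List.mem_pyRange_one] at hx
        rw [pvBody_eq]
        dsimp only
        rw [pvTrips_getD lMin x hx.1 hx.2])
    rw [hc, pvRange_bound lMin hn]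
    exact PySem.List.foldl_pyRange_zero_pyGetD' _ _ _ _
  · have h1 : PySem.List.pyRange 0 ((lMin.length : Int) - 2) 1 = [] :=
      PySem.List.pyRange_one_eq_nil (by omega)
    have h2 : ((lMin.zip (lMin.drop 1)).zip (lMin.drop 2)) = [] := by
      have := pvTrips_length lMin
      exact List.eq_nil_of_length_eq_zero (by omega)
    rw [h1, h2]
    rfl

-- the two folds build the same newList (first components of the respective states)
theorem pvGetD_last (nl : List Int) (h : nl ≠ []) :
    PySem.List.pyGetD nl ((nl.length : Int) - 1) 0 = PySem.List.pyGetD nl (-1) 0 := by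
  rw [PySem.List.pyGetD_neg_one nl 0 h]
  have ht : ((nl.length : Int) - 1) = ((nl.length - 1 : Nat) : Int) := by
    have := List.length_pos_iff.mpr h; omega
  rw [ht, PySem.List.pyGetD_natCast,
    List.getD_eq_getElem _ _ (by have := List.length_pos_iff.mpr h; omega)]
  exact (List.getLast_eq_getElem h).symm

theorem pvFold_rel (lMin : List Int) (t : List ((Int × Int) × Int)) :
    ∀ (nl : List Int), nl ≠ [] → ∀ (c : List Int) (d : PySem.Dict Int Int),
      (t.foldl (pvTBody lMin) ((nl.length : Int) - 1, nl, c)).2.1 =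
        (t.foldl Etapa7AltBody (nl, d)).1 := by
  induction t with
  | nil => intro nl _ c d; rfl
  | cons t0 t ih =>
    intro nl hne c d
    obtain ⟨⟨a, v⟩, b⟩ := t0
    simp only [List.foldl_cons]
    dsimp only [pvTBody, Etapa7AltBody]
    rw [pvGetD_last nl hne]
    by_cases hmin : v ≤ a ∧ v ≤ b
    · rw [if_pos hmin, if_pos hmin]
      by_cases hlast : v ≠ PySem.List.pyGetD nl (-1) 0
      · rw [if_pos hlast, if_pos hlast,
          show (nl.length : Int) - 1 + 1 = ((nl ++ [v]).length : Int) - 1 by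
            simp only [List.length_append, List.length_singleton]; push_cast; ring]
        exact ih (nl ++ [v]) (by simp) c d
      · rw [if_neg hlast, if_neg hlast]
        split <;> split <;> exact ih nl hne _ _
    · rw [if_neg hmin, if_neg hmin]
      exact ih nl hne c d

-- ===== VERDICT (by name: the statement is the Claim_ definition above) =====
theorem Etapa7_spec : Claim_equal_Etapa7 := by
  intro lMin C _hDom hPre
  obtain ⟨hne, -⟩ := hPre
  have hlen : 0 < lMin.length := List.length_pos_iff.mpr hne
  unfold Spec_Etapa7 Etapa7 Etapa7_alt
  dsimp only
  rw [pvLoopA_eq_trips]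
  have h1 : PySem.List.pyGetD lMin ((lMin.length : Int) - 1) 0 =
      PySem.List.pyGetD lMin (-1) 0 := by
    rw [PySem.List.pyGetD_neg_one lMin 0 hne]
    have ht : ((lMin.length : Int) - 1) = ((lMin.length - 1 : Nat) : Int) := by omega
    rw [ht, PySem.List.pyGetD_natCast]
    rw [List.getD_eq_getElem _ _ (by omega)]
    exact (List.getLast_eq_getElem hne).symm
  rw [h1]
  have h2 := pvFold_rel lMin ((lMin.zip (lMin.drop 1)).zip (lMin.drop 2))
    [PySem.List.pyGetD lMin 0 0] (by simp) C PySem.Dict.empty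
  norm_num [List.drop_one] at h2
  simp only [List.drop_one]
  rw [h2]
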